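-- pv_equiv track=rewrite | github.com/arterm-sedov/cmw-rag | rag_engine/api/app.py | _parse_think_tags
-- ===== SOURCE A (Python) =====
-- _THINK_OPEN = "<think>"
--
-- _THINK_CLOSE = "</think>"
--
-- def _normalize_think_tags(text: str) -> str:
--     """Normalize escaped think-tag variants to canonical ASCII form.
--
--     Some providers emit JSON-escaped or HTML-escaped angle brackets, producing mixed
--     tag pairs like ``\\u003cthink>`` … ``</think>`` or ``<think>`` … ``&lt;/think&gt;``.
--     We only normalize when the chunk includes the substring "think" to avoid touching
--     unrelated escaped content.
--     """
--     if "think" not in text.lower():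
--         return text
--     if "\\u003c" in text or "\\u003e" in text:
--         text = text.replace("\\u003c", "<").replace("\\u003e", ">")
--     if "&lt;" in text or "&gt;" in text:
--         text = text.replace("&lt;", "<").replace("&gt;", ">")
--     return text
--
-- def _parse_think_tags(
--     text: str,
--     reasoning: str,
--     in_block: bool,
-- ) -> tuple[str, str, bool, bool]:
--     """Parse <think>...</think> tags from a streamed text chunk.
--
--     Content inside paired tags is accumulated in ``reasoning``.
--     An orphan ``</think>`` (no matching open in current state) signals the caller
--     to reclassify buffered inter-tool assistant text from chat to the reasoning bubble.
--     Escaped tag variants are normalised before parsing.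
--
--     Returns:
--         (clean_text, reasoning, in_block, saw_orphan_close)
--     """
--     text = _normalize_think_tags(text)
--     if _THINK_OPEN not in text and _THINK_CLOSE not in text and not in_block:
--         return text, reasoning, in_block, False
--
--     clean: list[str] = []
--     saw_orphan = False
--     i = 0
--
--     while i < len(text):
--         if in_block:
--             end = text.find(_THINK_CLOSE, i)
--             if end == -1:
--                 seg = text[i:]
--                 if seg:
--                     reasoning = (reasoning + "\n" + seg) if reasoning else seg
--                 break
--             seg = text[i:end]
--             if seg:
--                 reasoning = (reasoning + "\n" + seg) if reasoning else seg
--             i = end + len(_THINK_CLOSE)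
--             in_block = False
--         else:
--             open_i = text.find(_THINK_OPEN, i)
--             close_i = text.find(_THINK_CLOSE, i)
--             if close_i != -1 and (open_i == -1 or close_i < open_i):
--                 # Orphan </think>: caller must reclassify buffered inter-tool text as reasoning.
--                 saw_orphan = True
--                 if close_i > i:
--                     clean.append(text[i:close_i])
--                 i = close_i + len(_THINK_CLOSE)
--                 continue
--             if open_i == -1:
--                 clean.append(text[i:])
--                 break
--             if open_i > i:
--                 clean.append(text[i:open_i])
--             i = open_i + len(_THINK_OPEN)
--             in_block = True
--
--     return "".join(clean), reasoning, in_block, saw_orphan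
-- ===== SOURCE B (Python) =====
-- _THINK_OPEN = "<think>"
--
-- _THINK_CLOSE = "</think>"
--
-- def _normalize_think_tags(text: str) -> str:
--     if "think" not in text.lower():
--         return text
--     if "\\u003c" in text or "\\u003e" in text:
--         text = text.replace("\\u003c", "<").replace("\\u003e", ">")
--     if "&lt;" in text or "&gt;" in text:
--         text = text.replace("&lt;", "<").replace("&gt;", ">")
--     return text
--
-- def _parse_think_tags(text, reasoning, in_block):
--     """Single left-to-right character scanner (two-mode state machine with a
--     segment buffer) instead of repeated find() jumps with index comparisons."""
--     text = _normalize_think_tags(text)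
--     if _THINK_OPEN not in text and _THINK_CLOSE not in text and not in_block:
--         return text, reasoning, in_block, False
--
--     clean = []
--     buf = []
--     saw_orphan = False
--     i = 0
--     n = len(text)
--     while i < n:
--         if in_block:
--             if text.startswith(_THINK_CLOSE, i):
--                 if buf:
--                     seg = "".join(buf)
--                     reasoning = (reasoning + "\n" + seg) if reasoning else seg
--                     buf = []
--                 in_block = False
--                 i += len(_THINK_CLOSE)
--             else:
--                 buf.append(text[i])
--                 i += 1
--         else:
--             if text.startswith(_THINK_OPEN, i):
--                 if buf:
--                     clean.append("".join(buf))
--                     buf = []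
--                 in_block = True
--                 i += len(_THINK_OPEN)
--             elif text.startswith(_THINK_CLOSE, i):
--                 if buf:
--                     clean.append("".join(buf))
--                     buf = []
--                 saw_orphan = True
--                 i += len(_THINK_CLOSE)
--             else:
--                 buf.append(text[i])
--                 i += 1
--     if buf:
--         seg = "".join(buf)
--         if in_block:
--             reasoning = (reasoning + "\n" + seg) if reasoning else seg
--         else:
--             clean.append(seg)
--     return "".join(clean), reasoning, in_block, saw_orphan
-- ===== Notes on version B (the rewrite author's own statement) =====
-- stated objective: alternative
-- what changed: Replaced A's loop of repeated str.find() jumps with earliest-tag index comparisons by a single left-to-right character scanner: a two-mode state machine that checks startswith at the cursor and accumulates the current segment in a buffer.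
import Mathlib
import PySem

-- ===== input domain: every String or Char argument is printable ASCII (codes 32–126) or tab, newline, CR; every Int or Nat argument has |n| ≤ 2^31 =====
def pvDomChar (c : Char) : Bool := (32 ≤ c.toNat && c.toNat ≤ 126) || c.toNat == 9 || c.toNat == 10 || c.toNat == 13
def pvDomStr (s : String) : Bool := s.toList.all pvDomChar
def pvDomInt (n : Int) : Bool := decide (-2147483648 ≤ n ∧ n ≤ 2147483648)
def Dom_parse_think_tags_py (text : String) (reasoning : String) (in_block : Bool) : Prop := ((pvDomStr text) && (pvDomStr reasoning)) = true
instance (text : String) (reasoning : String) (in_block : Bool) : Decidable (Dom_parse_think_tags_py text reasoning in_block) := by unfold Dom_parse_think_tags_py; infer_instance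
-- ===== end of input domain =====

-- B re-implements the tag parser as a single left-to-right character scanner (two-mode
-- state machine with a segment buffer) instead of A's repeated find() jumps; objective:
-- alternative (same behaviour, different traversal mechanics).

-- ===== PORT A =====

-- _THINK_OPEN / _THINK_CLOSE as char lists (shared by both ports, like the module constants)
def pvOpen : List Char := ['<', 't', 'h', 'i', 'n', 'k', '>']
def pvClose : List Char := ['<', '/', 't', 'h', 'i', 'n', 'k', '>']

-- reasoning = (reasoning + "\n" + seg) if reasoning else seg   (the join expression both Pythons contain)
def pvJoinR (r seg : List Char) : List Char := if r = [] then seg else r ++ '\n' :: seg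

-- port of _normalize_think_tags (helper of both Pythons, identical code)
def pvNormalize (text : String) : String :=
  if PySem.Str.isIn "think" (PySem.Str.lower text) = false then text
  else
    let t1 := if PySem.Str.isIn "\\u003c" text || PySem.Str.isIn "\\u003e" text
      then PySem.Str.replace (PySem.Str.replace text "\\u003c" "<") "\\u003e" ">" else text
    let t2 := if PySem.Str.isIn "&lt;" t1 || PySem.Str.isIn "&gt;" t1
      then PySem.Str.replace (PySem.Str.replace t1 "&lt;" "<") "&gt;" ">" else t1
    t2

-- A's while loop, transliterated in relative coordinates: `u` is text[i:], so
-- text.find(tag, i) becomes Chars.find u tag, text[i:end] becomes u.take, and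
-- advancing i becomes dropping from u; every branch is A's branch in A's order.
def pvLoopA (u : List Char) (reasoning : List Char) (in_block : Bool)
    (clean : List (List Char)) (saw : Bool) : List (List Char) × List Char × Bool × Bool :=
  if u = [] then (clean, reasoning, in_block, saw)                     -- while i < len(text)
  else if in_block then
    let e := PySem.Chars.find u pvClose                                -- end = text.find(close, i)
    if e = -1 then
      let seg := u                                                     -- seg = text[i:]
      (clean, if seg ≠ [] then pvJoinR reasoning seg else reasoning, in_block, saw)   -- break
    else
      let seg := u.take e.toNat                                        -- seg = text[i:end]
      pvLoopA (u.drop (e.toNat + 8)) (if seg ≠ [] then pvJoinR reasoning seg else reasoning) false clean saw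
  else
    let oi := PySem.Chars.find u pvOpen                                -- open_i
    let ci := PySem.Chars.find u pvClose                               -- close_i
    if ci ≠ -1 ∧ (oi = -1 ∨ ci < oi) then                              -- orphan </think>
      pvLoopA (u.drop (ci.toNat + 8)) reasoning in_block
        (if 0 < ci.toNat then clean ++ [u.take ci.toNat] else clean) true
    else if oi = -1 then (clean ++ [u], reasoning, in_block, saw)      -- clean.append(text[i:]); break
    else
      pvLoopA (u.drop (oi.toNat + 7)) reasoning true
        (if 0 < oi.toNat then clean ++ [u.take oi.toNat] else clean) saw
termination_by u.length
decreasing_by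
  all_goals (have hne : u ≠ [] := by assumption
             have := List.length_pos_iff.mpr hne
             simp only [List.length_drop]; omega)

def parse_think_tags_py (text : String) (reasoning : String) (in_block : Bool) : String × String × Bool × Bool :=
  let t := pvNormalize text
  if PySem.Str.isIn "<think>" t = false ∧ PySem.Str.isIn "</think>" t = false ∧ in_block = false then
    (t, reasoning, in_block, false)
  else
    let p := pvLoopA t.toList reasoning.toList in_block [] false
    (String.ofList (PySem.Chars.join [] p.1), String.ofList p.2.1, p.2.2.1, p.2.2.2)

-- ===== PORT B =====

-- B's while loop: one character at a time, a two-mode state machine with buffer `buf`.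
def pvLoopB (u : List Char) (in_block : Bool) (buf : List Char) (reasoning : List Char)
    (clean : List (List Char)) (saw : Bool) : List (List Char) × List Char × Bool × Bool :=
  match u with
  | [] =>                                                              -- after the loop: flush buf
    if buf ≠ [] then
      if in_block then (clean, pvJoinR reasoning buf, in_block, saw)
      else (clean ++ [buf], reasoning, in_block, saw)
    else (clean, reasoning, in_block, saw)
  | c :: rest =>
    if in_block then
      if PySem.Chars.startswith (c :: rest) pvClose then
        pvLoopB ((c :: rest).drop 8) false []
          (if buf ≠ [] then pvJoinR reasoning buf else reasoning) clean saw
      else pvLoopB rest in_block (buf ++ [c]) reasoning clean saw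
    else
      if PySem.Chars.startswith (c :: rest) pvOpen then
        pvLoopB ((c :: rest).drop 7) true [] reasoning
          (if buf ≠ [] then clean ++ [buf] else clean) saw
      else if PySem.Chars.startswith (c :: rest) pvClose then
        pvLoopB ((c :: rest).drop 8) in_block [] reasoning
          (if buf ≠ [] then clean ++ [buf] else clean) true
      else pvLoopB rest in_block (buf ++ [c]) reasoning clean saw
termination_by u.length
decreasing_by all_goals (simp only [List.length_drop, List.length_cons]; omega)

def parse_think_tags_py_alt (text : String) (reasoning : String) (in_block : Bool) : String × String × Bool × Bool :=
  let t := pvNormalize text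
  if PySem.Str.isIn "<think>" t = false ∧ PySem.Str.isIn "</think>" t = false ∧ in_block = false then
    (t, reasoning, in_block, false)
  else
    let p := pvLoopB t.toList in_block [] reasoning.toList [] false
    (String.ofList (PySem.Chars.join [] p.1), String.ofList p.2.1, p.2.2.1, p.2.2.2)

-- ===== PRECONDITION & SPEC =====
def Spec_parse_think_tags_py (text : String) (reasoning : String) (in_block : Bool) (out : String × String × Bool × Bool) : Prop := out = parse_think_tags_py_alt text reasoning in_block
instance (text : String) (reasoning : String) (in_block : Bool) (out : String × String × Bool × Bool) : Decidable (Spec_parse_think_tags_py text reasoning in_block out) := by unfold Spec_parse_think_tags_py; infer_instance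

-- ===== CLAIM (what is proved, stated in full; the proofs are below) =====
def Claim_equal_parse_think_tags_py : Prop := ∀ (text : String) (reasoning : String) (in_block : Bool), Dom_parse_think_tags_py text reasoning in_block → Spec_parse_think_tags_py text reasoning in_block (parse_think_tags_py text reasoning in_block)

-- ===== LEMMAS AND PROOFS =====

-- find points at a position we can name: prefix there, no prefix earlier
lemma pv_find_eq_of_first (s sub : List Char) (k : Nat) (h1 : sub <+: s.drop k)
    (h2 : ∀ j < k, ¬ sub <+: s.drop j) : PySem.Chars.find s sub = k := by
  have hin : PySem.Chars.isIn sub s = true := (PySem.Chars.exists_prefix_drop_iff_isIn sub s).mp ⟨k, h1⟩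
  have hne : PySem.Chars.find s sub ≠ -1 := by
    rw [Ne, PySem.Chars.find_eq_neg_one_iff]
    simpa using (PySem.Chars.isIn_iff_infix sub s).mp hin
  have h0 : 0 ≤ PySem.Chars.find s sub := by
    have := PySem.Chars.neg_one_le_find s sub; omega
  obtain ⟨hp, hmin⟩ := PySem.Chars.find_spec h0
  have hek : (PySem.Chars.find s sub).toNat = k := by
    rcases Nat.lt_trichotomy (PySem.Chars.find s sub).toNat k with h | h | h
    · exact absurd hp (h2 _ h)
    · exact h
    · exact absurd h1 (hmin k h)
  have := Int.toNat_of_nonneg h0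
  omega

lemma pv_find_eq_neg_one_of (s sub : List Char) (hsub : sub ≠ [])
    (h : ∀ j < s.length, ¬ sub <+: s.drop j) : PySem.Chars.find s sub = -1 := by
  rw [PySem.Chars.find_eq_neg_one_iff]
  intro hinf
  have hin : PySem.Chars.isIn sub s = true := (PySem.Chars.isIn_iff_infix sub s).mpr hinf
  obtain ⟨j, hj⟩ := (PySem.Chars.exists_prefix_drop_iff_isIn sub s).mpr hin
  by_cases hjl : j < s.length
  · exact h j hjl hj
  · rw [List.drop_eq_nil_of_le (by omega)] at hj
    exact hsub (List.prefix_nil.mp hj)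

lemma pv_find_append_first (buf u sub : List Char) (hp : sub <+: u)
    (hbuf : ∀ j < buf.length, ¬ sub <+: (buf ++ u).drop j) :
    PySem.Chars.find (buf ++ u) sub = buf.length := by
  exact pv_find_eq_of_first _ _ _ (by rwa [List.drop_left]) hbuf

lemma pv_find_append_cases (buf u sub : List Char)
    (hbuf : ∀ j < buf.length, ¬ sub <+: (buf ++ u).drop j) (hu : ¬ sub <+: u) :
    PySem.Chars.find (buf ++ u) sub = -1 ∨ (buf.length : Int) < PySem.Chars.find (buf ++ u) sub := by
  by_cases hne : PySem.Chars.find (buf ++ u) sub = -1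
  · exact Or.inl hne
  · right
    have h0 : 0 ≤ PySem.Chars.find (buf ++ u) sub := by
      have := PySem.Chars.neg_one_le_find (buf ++ u) sub; omega
    obtain ⟨hp, hmin⟩ := PySem.Chars.find_spec h0
    have hgt : buf.length < (PySem.Chars.find (buf ++ u) sub).toNat := by
      rcases Nat.lt_trichotomy (PySem.Chars.find (buf ++ u) sub).toNat buf.length with h | h | h
      · exact absurd hp (hbuf _ h)
      · rw [h, List.drop_left] at hp; exact absurd hp hu
      · exact h
    have := Int.toNat_of_nonneg h0
    omega

-- open and close tags cannot both start the same string
lemma pv_open_close_clash (u : List Char) (ho : pvOpen <+: u) (hc : pvClose <+: u) : False := by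
  obtain ⟨t1, h1⟩ := ho
  obtain ⟨t2, h2⟩ := hc
  rw [← h2] at h1
  simp [pvOpen, pvClose] at h1

-- the heart: B's scanner from a suffix with buffer buf equals A's loop on buf ++ suffix,
-- provided no close tag starts inside buf (and, outside a block, no open tag either)
lemma pv_loopB_eq_loopA (n : Nat) : ∀ (u : List Char), u.length = n →
    ∀ (inb : Bool) (buf r : List Char) (cl : List (List Char)) (saw : Bool),
    (∀ j < buf.length, ¬ pvClose <+: (buf ++ u).drop j) →
    (inb = false → ∀ j < buf.length, ¬ pvOpen <+: (buf ++ u).drop j) →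
    pvLoopB u inb buf r cl saw = pvLoopA (buf ++ u) r inb cl saw := by
  induction n using Nat.strong_induction_on with
  | _ n IH =>
  intro u hn inb buf r cl saw hC hO
  cases u with
  | nil =>
    rw [List.append_nil] at hC hO ⊢
    by_cases hb : buf = []
    · subst hb; cases inb <;> simp [pvLoopB, pvLoopA]
    · cases inb
      · have ho : PySem.Chars.find buf pvOpen = -1 :=
          pv_find_eq_neg_one_of _ _ (by decide) (hO rfl)
        have hc : PySem.Chars.find buf pvClose = -1 :=
          pv_find_eq_neg_one_of _ _ (by decide) hC
        rw [pvLoopB, pvLoopA]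
        simp [hb, ho, hc]
      · have hc : PySem.Chars.find buf pvClose = -1 :=
          pv_find_eq_neg_one_of _ _ (by decide) hC
        rw [pvLoopB, pvLoopA]
        simp [hb, hc]
  | cons c rest =>
    cases inb
    case true =>
      by_cases hcl : PySem.Chars.startswith (c :: rest) pvClose = true
      · -- </think> at the head of the suffix
        have hcp := (PySem.Chars.startswith_iff (c :: rest) pvClose).mp hcl
        have hfind : PySem.Chars.find (buf ++ c :: rest) pvClose = buf.length :=
          pv_find_append_first _ _ _ hcp hC
        have hne : ((buf.length : Int)) ≠ -1 := by omega
        have hdrop : (buf ++ c :: rest).drop (buf.length + 8) = (c :: rest).drop 8 :=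
          List.drop_length_add_append 8
        have hIH := IH ((c :: rest).drop 8).length
          (by simp only [List.length_drop, List.length_cons] at hn ⊢; omega) _ rfl false []
          (if buf ≠ [] then pvJoinR r buf else r) cl saw (by simp) (by simp)
        simp only [List.nil_append] at hIH
        conv_lhs => rw [pvLoopB]
        conv_rhs => rw [pvLoopA]
        simp [hcl, hfind, hne, hdrop]
        simpa using hIH
      · -- ordinary character: consume it into buf
        have hncp : ¬ pvClose <+: (c :: rest) := by
          rw [← PySem.Chars.startswith_iff]; simp [hcl]
        have hC' : ∀ j < (buf ++ [c]).length, ¬ pvClose <+: ((buf ++ [c]) ++ rest).drop j := by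
          rw [List.append_assoc]; simp only [List.singleton_append, List.length_append,
            List.length_singleton]
          intro j hj
          rcases Nat.lt_or_ge j buf.length with h | h
          · exact hC j h
          · have hj' : j = buf.length := by omega
            rw [hj', List.drop_left]; exact hncp
        have hIH := IH rest.length (by simp only [List.length_cons] at hn; omega) rest rfl true (buf ++ [c]) r cl saw hC'
          (by intro h; cases h)
        conv_lhs => rw [pvLoopB]
        simp only [hcl, Bool.false_eq_true, if_false, if_true]
        rw [hIH, List.append_assoc, List.singleton_append]
    case false =>
      by_cases hop : PySem.Chars.startswith (c :: rest) pvOpen = true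
      · -- <think> at the head of the suffix
        have hopp := (PySem.Chars.startswith_iff (c :: rest) pvOpen).mp hop
        have hfo : PySem.Chars.find (buf ++ c :: rest) pvOpen = buf.length :=
          pv_find_append_first _ _ _ hopp (fun j hj => (hO rfl) j hj)
        have hncp : ¬ pvClose <+: (c :: rest) := fun h => pv_open_close_clash _ hopp h
        have hcases := pv_find_append_cases buf (c :: rest) pvClose hC hncp
        have hcond : ¬ (PySem.Chars.find (buf ++ c :: rest) pvClose ≠ -1 ∧
            (PySem.Chars.find (buf ++ c :: rest) pvOpen = -1 ∨
             PySem.Chars.find (buf ++ c :: rest) pvClose < PySem.Chars.find (buf ++ c :: rest) pvOpen)) := by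
          rw [hfo]; rcases hcases with h | h <;> omega
        have hne : ((buf.length : Int)) ≠ -1 := by omega
        have hdrop : (buf ++ c :: rest).drop (buf.length + 7) = (c :: rest).drop 7 :=
          List.drop_length_add_append 7
        have hIH := IH ((c :: rest).drop 7).length
          (by simp only [List.length_drop, List.length_cons] at hn ⊢; omega) _ rfl true []
          r (if buf ≠ [] then cl ++ [buf] else cl) saw (by simp) (by simp)
        simp only [List.nil_append] at hIH
        conv_lhs => rw [pvLoopB]
        conv_rhs => rw [pvLoopA]
        rcases hcases with h | h
        · simp [hop, hfo, h, hne, hdrop, List.length_pos_iff]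
          simpa using hIH
        · have h2 : ¬ (PySem.Chars.find (buf ++ c :: rest) pvClose < (buf.length : Int)) := by omega
          simp [hop, hfo, h2, hne, hdrop, List.length_pos_iff]
          simpa using hIH
      · by_cases hcl : PySem.Chars.startswith (c :: rest) pvClose = true
        · -- orphan </think> at the head of the suffix
          have hcp := (PySem.Chars.startswith_iff (c :: rest) pvClose).mp hcl
          have hfc : PySem.Chars.find (buf ++ c :: rest) pvClose = buf.length :=
            pv_find_append_first _ _ _ hcp hC
          have hnop : ¬ pvOpen <+: (c :: rest) := by
            rw [← PySem.Chars.startswith_iff]; simp [hop]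
          have hocases := pv_find_append_cases buf (c :: rest) pvOpen (fun j hj => (hO rfl) j hj) hnop
          have hcond : (PySem.Chars.find (buf ++ c :: rest) pvClose ≠ -1 ∧
              (PySem.Chars.find (buf ++ c :: rest) pvOpen = -1 ∨
               PySem.Chars.find (buf ++ c :: rest) pvClose < PySem.Chars.find (buf ++ c :: rest) pvOpen)) := by
            rw [hfc]; rcases hocases with h | h <;> omega
          have hdrop : (buf ++ c :: rest).drop (buf.length + 8) = (c :: rest).drop 8 :=
            List.drop_length_add_append 8
          have hIH := IH ((c :: rest).drop 8).length
            (by simp only [List.length_drop, List.length_cons] at hn ⊢; omega) _ rfl false []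
            r (if buf ≠ [] then cl ++ [buf] else cl) true (by simp) (by simp)
          simp only [List.nil_append] at hIH
          conv_lhs => rw [pvLoopB]
          conv_rhs => rw [pvLoopA]
          rcases hocases with h | h
          · simp [hop, hcl, hfc, h, hdrop, List.length_pos_iff]
            simpa using hIH
          · simp [hop, hcl, hfc, h, hdrop, List.length_pos_iff]
            simpa using hIH
        · -- ordinary character: consume it into buf
          have hncp : ¬ pvClose <+: (c :: rest) := by
            rw [← PySem.Chars.startswith_iff]; simp [hcl]
          have hnop : ¬ pvOpen <+: (c :: rest) := by
            rw [← PySem.Chars.startswith_iff]; simp [hop]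
          have hstep : ∀ (tag : List Char), ¬ tag <+: (c :: rest) →
              (∀ j < buf.length, ¬ tag <+: (buf ++ c :: rest).drop j) →
              ∀ j < (buf ++ [c]).length, ¬ tag <+: ((buf ++ [c]) ++ rest).drop j := by
            intro tag htag hb
            rw [List.append_assoc]; simp only [List.singleton_append, List.length_append,
              List.length_singleton]
            intro j hj
            rcases Nat.lt_or_ge j buf.length with h | h
            · exact hb j h
            · have hj' : j = buf.length := by omega
              rw [hj', List.drop_left]; exact htag
          have hIH := IH rest.length (by simp only [List.length_cons] at hn; omega) rest rfl false (buf ++ [c]) r cl saw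
            (hstep pvClose hncp hC) (fun _ => hstep pvOpen hnop (hO rfl))
          conv_lhs => rw [pvLoopB]
          simp only [hop, hcl, Bool.false_eq_true, if_false]
          rw [hIH, List.append_assoc, List.singleton_append]

-- ===== VERDICT (by name: the statement is the Claim_ definition above) =====
theorem parse_think_tags_py_spec : Claim_equal_parse_think_tags_py := by
  intro text reasoning in_block _
  unfold Spec_parse_think_tags_py parse_think_tags_py parse_think_tags_py_alt
  have h := pv_loopB_eq_loopA ((pvNormalize text).toList.length) (pvNormalize text).toList rfl
    in_block [] reasoning.toList [] false (by cases in_block <;> simp)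
  simp only [List.nil_append] at h
  simp [h]
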